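-- pv_equiv track=rewrite | github.com/MrBrantCode/unitest_baseline | mut_generate/mist_train_taco/taco_11682/solution.py | is_s_palindrome
-- ===== SOURCE A (Python) =====
-- def is_s_palindrome(s: str) -> str:
--     chars = {
--         'A': {'A'}, 'b': {'d'}, 'd': {'b'}, 'H': {'H'}, 'M': {'M'}, 'O': {'O'},
--         'o': {'o'}, 'T': {'T'}, 'U': {'U'}, 'V': {'V'}, 'v': {'v'}, 'W': {'W'},
--         'w': {'w'}, 'X': {'X'}, 'x': {'x'}, 'Y': {'Y'}, 'q': {'p'}, 'p': {'q'},
--         'I': {'I'}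
--     }
--     not_clean = {'p', 'q', 'b', 'd'}
--
--     ans = True
--     for i in range(len(s) // 2):
--         if s[i] not in chars.keys() or s[len(s) - i - 1] not in chars[s[i]]:
--             ans = False
--             break
--
--     if len(s) % 2 != 0 and (s[len(s) // 2] not in chars.keys() or s[len(s) // 2] in not_clean):
--         ans = False
--
--     return "TAK" if ans else "NIE"
-- ===== SOURCE B (Python) =====
-- def is_s_palindrome(s: str) -> str:
--     mirror = {
--         'A': 'A', 'b': 'd', 'd': 'b', 'H': 'H', 'M': 'M', 'O': 'O',
--         'o': 'o', 'T': 'T', 'U': 'U', 'V': 'V', 'v': 'v', 'W': 'W',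
--         'w': 'w', 'X': 'X', 'x': 'x', 'Y': 'Y', 'q': 'p', 'p': 'q',
--         'I': 'I'
--     }
--     if any(c not in mirror for c in s):
--         return "NIE"
--     mirrored = ''.join(mirror[c] for c in s)
--     return "TAK" if mirrored == s[::-1] else "NIE"
-- ===== Notes on version B (the rewrite author's own statement) =====
-- stated objective: simpler
-- what changed: Replaces the two-pointer half-scan over a dict of singleton sets plus a separate middle-character case by a flat mirror map: check membership of every character, then compare the whole mirrored string with the reversed string.
import Mathlib
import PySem

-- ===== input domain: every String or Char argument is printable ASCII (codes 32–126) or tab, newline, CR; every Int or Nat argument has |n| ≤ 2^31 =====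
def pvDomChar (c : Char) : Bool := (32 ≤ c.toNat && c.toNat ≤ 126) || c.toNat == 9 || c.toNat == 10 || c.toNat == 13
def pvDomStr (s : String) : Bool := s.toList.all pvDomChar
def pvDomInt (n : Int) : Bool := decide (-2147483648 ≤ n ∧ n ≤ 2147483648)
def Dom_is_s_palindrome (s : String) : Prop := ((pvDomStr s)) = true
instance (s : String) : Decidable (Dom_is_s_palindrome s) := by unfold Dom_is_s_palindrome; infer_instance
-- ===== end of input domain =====

-- B replaces A's two-pointer half-scan over a dict of singleton sets (plus a separate
-- middle-character case) by a flat mirror map applied to the whole string and compared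
-- with the reversed string; same O(n) cost, simpler decomposition.

-- ===== PORT A =====
def pvCharsA : PySem.Dict Char (PySem.Set Char) :=
  PySem.Dict.ofList [('A', PySem.Set.ofList ['A']), ('b', PySem.Set.ofList ['d']),
    ('d', PySem.Set.ofList ['b']), ('H', PySem.Set.ofList ['H']), ('M', PySem.Set.ofList ['M']),
    ('O', PySem.Set.ofList ['O']), ('o', PySem.Set.ofList ['o']), ('T', PySem.Set.ofList ['T']),
    ('U', PySem.Set.ofList ['U']), ('V', PySem.Set.ofList ['V']), ('v', PySem.Set.ofList ['v']),
    ('W', PySem.Set.ofList ['W']), ('w', PySem.Set.ofList ['w']), ('X', PySem.Set.ofList ['X']),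
    ('x', PySem.Set.ofList ['x']), ('Y', PySem.Set.ofList ['Y']), ('q', PySem.Set.ofList ['p']),
    ('p', PySem.Set.ofList ['q']), ('I', PySem.Set.ofList ['I'])]

def pvNotClean : PySem.Set Char := PySem.Set.ofList ['p', 'q', 'b', 'd']

-- the 'for i in range(len(s)//2)' loop with its break (indices always in range, so pyGetD is exact)
def pvLoopA (l : List Char) (n : Int) : List Int → Bool
  | [] => true
  | i :: rest =>
    if !(pvCharsA.contains (PySem.List.pyGetD l i ' '))
        || !(PySem.Set.contains ((pvCharsA.get? (PySem.List.pyGetD l i ' ')).getD PySem.Set.empty)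
              (PySem.List.pyGetD l (n - i - 1) ' ')) then
      false
    else pvLoopA l n rest

def is_s_palindrome (s : String) : String :=
  let l := s.toList
  let n : Int := PySem.Str.len s
  let ans := pvLoopA l n (PySem.List.pyRange 0 (PySem.Int.floordiv n 2) 1)
  let ans :=
    if PySem.Int.mod n 2 != 0
        && (!(pvCharsA.contains (PySem.List.pyGetD l (PySem.Int.floordiv n 2) ' '))
            || pvNotClean.contains (PySem.List.pyGetD l (PySem.Int.floordiv n 2) ' ')) then
      false
    else ans
  if ans then "TAK" else "NIE"

-- ===== PORT B =====
def pvMirror : PySem.Dict Char Char :=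
  PySem.Dict.ofList [('A', 'A'), ('b', 'd'), ('d', 'b'), ('H', 'H'), ('M', 'M'), ('O', 'O'),
    ('o', 'o'), ('T', 'T'), ('U', 'U'), ('V', 'V'), ('v', 'v'), ('W', 'W'),
    ('w', 'w'), ('X', 'X'), ('x', 'x'), ('Y', 'Y'), ('q', 'p'), ('p', 'q'), ('I', 'I')]

def is_s_palindrome_alt (s : String) : String :=
  let l := s.toList
  if l.any (fun c => !(pvMirror.contains c)) then "NIE"
  else if l.map (fun c => (pvMirror.get? c).getD c) = l.reverse then "TAK" else "NIE"

-- ===== PRECONDITION & SPEC =====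
def Spec_is_s_palindrome (s : String) (out : String) : Prop := out = is_s_palindrome_alt s
instance (s : String) (out : String) : Decidable (Spec_is_s_palindrome s out) := by unfold Spec_is_s_palindrome; infer_instance

-- ===== CLAIM (what is proved, stated in full; the proofs are below) =====
def Claim_equal_is_s_palindrome : Prop := ∀ (s : String), Dom_is_s_palindrome s → Spec_is_s_palindrome s (is_s_palindrome s)

-- ===== LEMMAS AND PROOFS =====

-- the two literal dicts have the same keys
lemma pvKeys_eq : pvCharsA.keys = pvMirror.keys := by decide

-- the mirror map is an involution
lemma pvMirror_invol (a b : Char) (h : pvMirror.get? a = some b) : pvMirror.get? b = some a := by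
  have hm : (a, b) ∈ pvMirror.items := PySem.Dict.mem_items_of_get?_eq_some _ h
  have e : pvMirror.items = [('A', 'A'), ('b', 'd'), ('d', 'b'), ('H', 'H'), ('M', 'M'), ('O', 'O'),
    ('o', 'o'), ('T', 'T'), ('U', 'U'), ('V', 'V'), ('v', 'v'), ('W', 'W'),
    ('w', 'w'), ('X', 'X'), ('x', 'x'), ('Y', 'Y'), ('q', 'p'), ('p', 'q'), ('I', 'I')] := by decide
  rw [e] at hm
  simp only [List.mem_cons, List.not_mem_nil, or_false, Prod.mk.injEq] at hm
  rcases hm with ⟨rfl, rfl⟩|⟨rfl, rfl⟩|⟨rfl, rfl⟩|⟨rfl, rfl⟩|⟨rfl, rfl⟩|⟨rfl, rfl⟩|⟨rfl, rfl⟩|⟨rfl, rfl⟩|⟨rfl, rfl⟩|⟨rfl, rfl⟩|⟨rfl, rfl⟩|⟨rfl, rfl⟩|⟨rfl, rfl⟩|⟨rfl, rfl⟩|⟨rfl, rfl⟩|⟨rfl, rfl⟩|⟨rfl, rfl⟩|⟨rfl, rfl⟩|⟨rfl, rfl⟩ <;> decide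

-- for every mirror pair (a, m), A's dict maps a to the singleton set {m}
lemma pvPairA_core (a m : Char) (h : pvMirror.get? a = some m) :
    pvCharsA.get? a = some (PySem.Set.ofList [m]) := by
  have hm : (a, m) ∈ pvMirror.items := PySem.Dict.mem_items_of_get?_eq_some _ h
  have e : pvMirror.items = [('A', 'A'), ('b', 'd'), ('d', 'b'), ('H', 'H'), ('M', 'M'), ('O', 'O'),
    ('o', 'o'), ('T', 'T'), ('U', 'U'), ('V', 'V'), ('v', 'v'), ('W', 'W'),
    ('w', 'w'), ('X', 'X'), ('x', 'x'), ('Y', 'Y'), ('q', 'p'), ('p', 'q'), ('I', 'I')] := by decide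
  rw [e] at hm
  simp only [List.mem_cons, List.not_mem_nil, or_false, Prod.mk.injEq] at hm
  rcases hm with ⟨rfl, rfl⟩|⟨rfl, rfl⟩|⟨rfl, rfl⟩|⟨rfl, rfl⟩|⟨rfl, rfl⟩|⟨rfl, rfl⟩|⟨rfl, rfl⟩|⟨rfl, rfl⟩|⟨rfl, rfl⟩|⟨rfl, rfl⟩|⟨rfl, rfl⟩|⟨rfl, rfl⟩|⟨rfl, rfl⟩|⟨rfl, rfl⟩|⟨rfl, rfl⟩|⟨rfl, rfl⟩|⟨rfl, rfl⟩|⟨rfl, rfl⟩|⟨rfl, rfl⟩ <;> decide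

-- a is in A's not_clean set exactly when its mirror differs from it
lemma pvNotClean_core (a m : Char) (h : pvMirror.get? a = some m) :
    pvNotClean.contains a = (m != a) := by
  have hm : (a, m) ∈ pvMirror.items := PySem.Dict.mem_items_of_get?_eq_some _ h
  have e : pvMirror.items = [('A', 'A'), ('b', 'd'), ('d', 'b'), ('H', 'H'), ('M', 'M'), ('O', 'O'),
    ('o', 'o'), ('T', 'T'), ('U', 'U'), ('V', 'V'), ('v', 'v'), ('W', 'W'),
    ('w', 'w'), ('X', 'X'), ('x', 'x'), ('Y', 'Y'), ('q', 'p'), ('p', 'q'), ('I', 'I')] := by decide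
  rw [e] at hm
  simp only [List.mem_cons, List.not_mem_nil, or_false, Prod.mk.injEq] at hm
  rcases hm with ⟨rfl, rfl⟩|⟨rfl, rfl⟩|⟨rfl, rfl⟩|⟨rfl, rfl⟩|⟨rfl, rfl⟩|⟨rfl, rfl⟩|⟨rfl, rfl⟩|⟨rfl, rfl⟩|⟨rfl, rfl⟩|⟨rfl, rfl⟩|⟨rfl, rfl⟩|⟨rfl, rfl⟩|⟨rfl, rfl⟩|⟨rfl, rfl⟩|⟨rfl, rfl⟩|⟨rfl, rfl⟩|⟨rfl, rfl⟩|⟨rfl, rfl⟩|⟨rfl, rfl⟩ <;> decide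

lemma pvGetNoneA (a : Char) (h : pvMirror.get? a = none) : pvCharsA.get? a = none := by
  rw [PySem.Dict.get?_eq_none_iff_not_mem_keys] at h ⊢
  rw [pvKeys_eq]
  exact h

-- A's pair test at characters (a, b) says exactly: mirror[a] is defined and equals b
lemma pvPairA_iff (a b : Char) :
    (pvCharsA.contains a
      && PySem.Set.contains ((pvCharsA.get? a).getD PySem.Set.empty) b) = true
      ↔ pvMirror.get? a = some b := by
  cases o : pvMirror.get? a with
  | none =>
    have hA := pvGetNoneA a o
    have hc : pvCharsA.contains a = false := by
      rw [PySem.Dict.contains_eq_isSome_get?, hA]; rfl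
    simp [hc]
  | some m =>
    have hA := pvPairA_core a m o
    have hc : pvCharsA.contains a = true := by
      rw [PySem.Dict.contains_eq_isSome_get?, hA]; rfl
    rw [hc, hA]
    simp [eq_comm]

-- A's middle test says exactly: mirror[a] is defined and equals a
lemma pvMidA_iff (a : Char) :
    (pvCharsA.contains a && !(pvNotClean.contains a)) = true ↔ pvMirror.get? a = some a := by
  cases o : pvMirror.get? a with
  | none =>
    have hA := pvGetNoneA a o
    have hc : pvCharsA.contains a = false := by
      rw [PySem.Dict.contains_eq_isSome_get?, hA]; rfl
    simp [hc]
  | some m =>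
    have hA := pvPairA_core a m o
    have hc : pvCharsA.contains a = true := by
      rw [PySem.Dict.contains_eq_isSome_get?, hA]; rfl
    rw [hc, pvNotClean_core a m o]
    simp [bne]

-- B's per-character test in the same form
lemma pvPairB_iff (a b : Char) :
    (pvMirror.contains a = true ∧ (pvMirror.get? a).getD a = b) ↔ pvMirror.get? a = some b := by
  rw [PySem.Dict.contains_eq_isSome_get?]
  cases h : pvMirror.get? a <;> simp

-- the per-index condition both programs decide
def pvP (l : List Char) (i : Nat) : Prop :=
  pvMirror.get? (l.getD i ' ') = some (l.getD (l.length - 1 - i) ' ')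

lemma pvP_symm (l : List Char) (i j : Nat) (hi : i < l.length) (hj : j = l.length - 1 - i)
    (h : pvP l i) : pvP l j := by
  unfold pvP at h ⊢
  have := pvMirror_invol _ _ h
  rw [hj]
  have : l.length - 1 - (l.length - 1 - i) = i := by omega
  rw [show l.length - 1 - (l.length - 1 - i) = i from this]
  exact pvMirror_invol _ _ h

-- checking the first half plus the middle is checking every index
lemma pvHalf_iff (l : List Char) :
    ((∀ i, i < l.length / 2 → pvP l i) ∧ (l.length % 2 = 1 → pvP l (l.length / 2)))
      ↔ ∀ i, i < l.length → pvP l i := by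
  constructor
  · rintro ⟨hhalf, hmid⟩ i hi
    by_cases h1 : i < l.length / 2
    · exact hhalf i h1
    · by_cases h2 : l.length % 2 = 1 ∧ i = l.length / 2
      · rw [h2.2]; exact hmid h2.1
      · have hj : l.length - 1 - i < l.length / 2 := by omega
        exact pvP_symm l _ i (by omega) (by omega) (hhalf _ hj)
  · intro h
    exact ⟨fun i hi => h i (by omega), fun _ => h _ (by omega)⟩

-- the A loop returns true iff every index of the list passes the pair test
lemma pvLoopA_iff (l : List Char) (n : Int) (is : List Int) :
    pvLoopA l n is = true
      ↔ ∀ i ∈ is, (pvCharsA.contains (PySem.List.pyGetD l i ' ')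
          && PySem.Set.contains ((pvCharsA.get? (PySem.List.pyGetD l i ' ')).getD PySem.Set.empty)
              (PySem.List.pyGetD l (n - i - 1) ' ')) = true := by
  induction is with
  | nil => simp [pvLoopA]
  | cons i rest ih =>
    simp only [pvLoopA, List.mem_cons]
    split
    · rename_i hcond
      simp only [Bool.or_eq_true, Bool.not_eq_true'] at hcond
      constructor
      · intro h; exact absurd h (by simp)
      · intro h
        have h2 := h i (Or.inl rfl)
        rw [Bool.and_eq_true] at h2
        rcases hcond with hc | hc
        · rw [h2.1] at hc; exact absurd hc (by simp)
        · rw [h2.2] at hc; exact absurd hc (by simp)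
    · rename_i hcond
      rw [ih]
      constructor
      · intro hrec j hj
        rcases hj with rfl | hj
        · simp only [Bool.or_eq_true, Bool.not_eq_true', not_or, Bool.ne_false_iff] at hcond
          rw [Bool.and_eq_true]
          exact ⟨hcond.1, hcond.2⟩
        · exact hrec j hj
      · intro h j hj; exact h j (Or.inr hj)

-- B returns "TAK" iff every index passes
lemma pvAltB_iff (l : List Char) :
    (l.any (fun c => !(pvMirror.contains c)) = false
        ∧ l.map (fun c => (pvMirror.get? c).getD c) = l.reverse)
      ↔ ∀ i, i < l.length → pvP l i := by
  constructor
  · rintro ⟨h1, h2⟩ i hi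
    have hc : pvMirror.contains (l.getD i ' ') = true := by
      rw [List.any_eq_false] at h1
      have := h1 (l.getD i ' ') (by rw [List.getD_eq_getElem l ' ' hi]; exact l.getElem_mem hi)
      simpa using this
    have hmapi : (pvMirror.get? (l.getD i ' ')).getD (l.getD i ' ') = l.getD (l.length - 1 - i) ' ' := by
      have e1 := congrArg (fun t => t.getD i ' ') h2
      simp only [List.getD_eq_getElem?_getD] at e1
      rw [List.getElem?_map] at e1
      rw [List.getElem?_reverse hi] at e1
      rw [List.getElem?_eq_getElem hi] at e1
      rw [List.getElem?_eq_getElem (show l.length - 1 - i < l.length by omega)] at e1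
      simp only [Option.map_some, Option.getD_some] at e1
      rw [List.getD_eq_getElem l ' ' hi, List.getD_eq_getElem l ' ' (show l.length - 1 - i < l.length by omega)]
      exact e1
    exact (pvPairB_iff _ _).mp ⟨hc, hmapi⟩
  · intro h
    constructor
    · rw [List.any_eq_false]
      intro c hcmem
      obtain ⟨i, hi, rfl⟩ := List.mem_iff_getElem.mp hcmem
      have hp := (pvPairB_iff _ _).mpr (h i hi)
      rw [List.getD_eq_getElem l ' ' hi] at hp
      simp [hp.1]
    · apply List.ext_getElem (by simp)
      intro i hi1 hi2
      simp only [List.length_map] at hi1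
      have hp := (pvPairB_iff _ _).mpr (h i hi1)
      rw [List.getD_eq_getElem l ' ' hi1,
        List.getD_eq_getElem l ' ' (show l.length - 1 - i < l.length by omega)] at hp
      rw [List.getElem_map, List.getElem_reverse]
      exact hp.2

-- A's half loop in index form
lemma pvAhalf_iff (l : List Char) :
    pvLoopA l (l.length : Int) (PySem.List.pyRange 0 (PySem.Int.floordiv (l.length : Int) 2) 1) = true
      ↔ ∀ k, k < l.length / 2 → pvP l k := by
  have hfd : PySem.Int.floordiv ((l.length : Nat) : Int) 2 = ((l.length / 2 : Nat) : Int) := by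
    exact_mod_cast PySem.Int.floordiv_natCast l.length 2
  rw [pvLoopA_iff]
  constructor
  · intro h k hk
    have hmem : ((k : Nat) : Int) ∈ PySem.List.pyRange 0 (PySem.Int.floordiv (l.length : Int) 2) 1 := by
      rw [PySem.List.mem_pyRange_one, hfd]
      constructor
      · positivity
      · exact_mod_cast hk
    have hp := (pvPairA_iff _ _).mp (h _ hmem)
    rw [PySem.List.pyGetD_natCast] at hp
    rw [show ((l.length : Nat) : Int) - (k : Int) - 1 = ((l.length - 1 - k : Nat) : Int) by omega] at hp
    rw [PySem.List.pyGetD_natCast] at hp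
    exact hp
  · intro h i hmem
    rw [PySem.List.mem_pyRange_one, hfd] at hmem
    obtain ⟨h0, hlt⟩ := hmem
    obtain ⟨k, rfl⟩ : ∃ k : Nat, i = (k : Int) := ⟨i.toNat, (Int.toNat_of_nonneg h0).symm⟩
    have hk : k < l.length / 2 := by exact_mod_cast hlt
    apply (pvPairA_iff _ _).mpr
    have hp := h k hk
    rw [PySem.List.pyGetD_natCast]
    rw [show ((l.length : Nat) : Int) - (k : Int) - 1 = ((l.length - 1 - k : Nat) : Int) by omega]
    rw [PySem.List.pyGetD_natCast]
    exact hp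

lemma pvBoolAux (x y : Bool) : ((!x || y) = false) ↔ ((x && !y) = true) := by
  cases x <;> cases y <;> simp

-- A's middle test in index form
lemma pvAmid_iff (l : List Char) :
    (PySem.Int.mod (l.length : Int) 2 != 0
        && (!(pvCharsA.contains (PySem.List.pyGetD l (PySem.Int.floordiv (l.length : Int) 2) ' '))
            || pvNotClean.contains (PySem.List.pyGetD l (PySem.Int.floordiv (l.length : Int) 2) ' '))) = false
      ↔ (l.length % 2 = 1 → pvP l (l.length / 2)) := by
  have hfd : PySem.Int.floordiv ((l.length : Nat) : Int) 2 = ((l.length / 2 : Nat) : Int) := by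
    exact_mod_cast PySem.Int.floordiv_natCast l.length 2
  have hmod : PySem.Int.mod ((l.length : Nat) : Int) 2 = ((l.length % 2 : Nat) : Int) := by
    exact_mod_cast PySem.Int.mod_natCast l.length 2
  rw [hfd, hmod, PySem.List.pyGetD_natCast]
  by_cases ho : l.length % 2 = 1
  · have hmid : pvP l (l.length / 2)
        ↔ pvMirror.get? (l.getD (l.length / 2) ' ') = some (l.getD (l.length / 2) ' ') := by
      unfold pvP
      rw [show l.length - 1 - l.length / 2 = l.length / 2 by omega]
    rw [ho, show ((((1 : Nat) : Int)) != 0) = true from by decide, Bool.true_and, pvBoolAux,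
      pvMidA_iff]
    constructor
    · intro h _
      exact hmid.mpr h
    · intro h
      exact hmid.mp (h rfl)
  · have h0 : l.length % 2 = 0 := by omega
    rw [h0, show ((((0 : Nat) : Int)) != 0) = false from by decide, Bool.false_and]
    simp

-- ===== VERDICT (by name: the statement is the Claim_ definition above) =====
theorem is_s_palindrome_spec : Claim_equal_is_s_palindrome := by
  intro s _
  unfold Spec_is_s_palindrome
  by_cases hP : ∀ i, i < s.toList.length → pvP s.toList i
  · have hB : is_s_palindrome_alt s = "TAK" := by
      obtain ⟨h1, h2⟩ := (pvAltB_iff s.toList).mpr hP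
      simp only [is_s_palindrome_alt]
      rw [h1, h2]
      simp
    have hA : is_s_palindrome s = "TAK" := by
      rw [← pvHalf_iff s.toList] at hP
      simp only [is_s_palindrome, PySem.Str.len_eq]
      rw [(pvAhalf_iff s.toList).mpr hP.1, (pvAmid_iff s.toList).mpr hP.2]
      simp
    rw [hA, hB]
  · have hB : is_s_palindrome_alt s = "NIE" := by
      simp only [is_s_palindrome_alt]
      cases ha : s.toList.any (fun c => !(pvMirror.contains c)) with
      | true => simp
      | false =>
        have h2 : ¬ (s.toList.map (fun c => (pvMirror.get? c).getD c) = s.toList.reverse) := by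
          intro hm
          exact hP ((pvAltB_iff s.toList).mp ⟨ha, hm⟩)
        simp [h2]
    have hA : is_s_palindrome s = "NIE" := by
      rw [← pvHalf_iff s.toList] at hP
      simp only [is_s_palindrome, PySem.Str.len_eq]
      by_cases hh : ∀ k, k < s.toList.length / 2 → pvP s.toList k
      · have hm : ¬ (s.toList.length % 2 = 1 → pvP s.toList (s.toList.length / 2)) := by
          intro hm
          exact hP ⟨hh, hm⟩
        have hmb : (PySem.Int.mod (s.toList.length : Int) 2 != 0
            && (!(pvCharsA.contains (PySem.List.pyGetD s.toList (PySem.Int.floordiv (s.toList.length : Int) 2) ' '))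
                || pvNotClean.contains (PySem.List.pyGetD s.toList (PySem.Int.floordiv (s.toList.length : Int) 2) ' '))) = true := by
          cases hx : (PySem.Int.mod (s.toList.length : Int) 2 != 0
            && (!(pvCharsA.contains (PySem.List.pyGetD s.toList (PySem.Int.floordiv (s.toList.length : Int) 2) ' '))
                || pvNotClean.contains (PySem.List.pyGetD s.toList (PySem.Int.floordiv (s.toList.length : Int) 2) ' '))) with
          | true => rfl
          | false => exact absurd ((pvAmid_iff s.toList).mp hx) hm
        rw [hmb]
        simp
      · have hlb : pvLoopA s.toList (s.toList.length : Int)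
            (PySem.List.pyRange 0 (PySem.Int.floordiv (s.toList.length : Int) 2) 1) = false := by
          cases hx : pvLoopA s.toList (s.toList.length : Int)
              (PySem.List.pyRange 0 (PySem.Int.floordiv (s.toList.length : Int) 2) 1) with
          | false => rfl
          | true => exact absurd ((pvAhalf_iff s.toList).mp hx) hh
        rw [hlb]
        cases hx : (PySem.Int.mod (s.toList.length : Int) 2 != 0
            && (!(pvCharsA.contains (PySem.List.pyGetD s.toList (PySem.Int.floordiv (s.toList.length : Int) 2) ' '))
                || pvNotClean.contains (PySem.List.pyGetD s.toList (PySem.Int.floordiv (s.toList.length : Int) 2) ' '))) <;>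
          simp
    rw [hA, hB]
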